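-- pv_equiv track=rewrite | github.com/k-ngo/boltzomics | drug_screening_input.py | create_sequence_mapping
-- ===== SOURCE A (Python) =====
-- from typing import List, Tuple, Dict, Optional
--
-- def create_sequence_mapping(input_seq: str, canonical_seq: str, chain_start: int) -> Dict[int, int]:
--     """Create mapping between canonical and input sequence positions using sliding window alignment."""
--     mapping = {}
--
--     if not canonical_seq:
--         # Simple 1:1 mapping if no canonical sequence
--         for i in range(len(input_seq)):
--             mapping[i + 1] = chain_start + i
--         return mapping
--
--     # Find best alignment by sliding input sequence along canonical sequence
--     # Try all possible starting positions of input_seq within canonical_seq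
--     best_start_pos = 0
--     best_matches = 0
--
--     # Search range: input sequence could start anywhere in the canonical sequence
--     max_search_range = len(canonical_seq) - len(input_seq) + 1
--
--     for start_pos in range(max(0, -len(input_seq) + 1), min(len(canonical_seq), len(canonical_seq) + len(input_seq))):
--         matches = 0
--         # Count matches when input_seq is positioned at start_pos in canonical_seq
--         for i in range(len(input_seq)):
--             canonical_idx = start_pos + i
--             if 0 <= canonical_idx < len(canonical_seq):
--                 if canonical_seq[canonical_idx] == input_seq[i]:
--                     matches += 1
--
--         if matches > best_matches:
--             best_matches = matches
--             best_start_pos = start_pos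
--
--     # Create mapping based on best alignment
--     # Canonical position = best_start_pos + input_position
--     for i in range(len(input_seq)):
--         canonical_pos = best_start_pos + i + 1  # +1 for 1-based indexing
--         if 1 <= canonical_pos <= len(canonical_seq):
--             mapping[canonical_pos] = chain_start + i
--
--     return mapping
-- ===== SOURCE B (Python) =====
-- def create_sequence_mapping(input_seq: str, canonical_seq: str, chain_start: int):
--     """Offset-voting alignment: index canonical positions per character, vote
--     match counts per offset, pick the smallest offset with the maximal count."""
--     n, m = len(input_seq), len(canonical_seq)
--     if not canonical_seq:
--         return {i + 1: chain_start + i for i in range(n)}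
--
--     positions = {}
--     for j, ch in enumerate(canonical_seq):
--         positions.setdefault(ch, []).append(j)
--
--     votes = {}
--     for i, ch in enumerate(input_seq):
--         for d in [j - i for j in positions.get(ch, []) if j >= i]:
--             votes[d] = votes.get(d, 0) + 1
--
--     best, best_count = 0, 0
--     for d in range(m):
--         c = votes.get(d, 0)
--         if c > best_count:
--             best, best_count = d, c
--
--     return {best + i + 1: chain_start + i for i in range(n) if best + i + 1 <= m}
-- ===== Notes on version B (the rewrite author's own statement) =====
-- stated objective: faster
-- what changed: A brute-forces every offset against every input position (nested loops with per-offset rescans); B builds a per-character position index of the canonical sequence once and lets each matching (input,canonical) character pair vote for its offset in a counter dict, so only actually-matching pairs are ever touched, then scans the vote counts for the first maximum.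
import Mathlib
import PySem

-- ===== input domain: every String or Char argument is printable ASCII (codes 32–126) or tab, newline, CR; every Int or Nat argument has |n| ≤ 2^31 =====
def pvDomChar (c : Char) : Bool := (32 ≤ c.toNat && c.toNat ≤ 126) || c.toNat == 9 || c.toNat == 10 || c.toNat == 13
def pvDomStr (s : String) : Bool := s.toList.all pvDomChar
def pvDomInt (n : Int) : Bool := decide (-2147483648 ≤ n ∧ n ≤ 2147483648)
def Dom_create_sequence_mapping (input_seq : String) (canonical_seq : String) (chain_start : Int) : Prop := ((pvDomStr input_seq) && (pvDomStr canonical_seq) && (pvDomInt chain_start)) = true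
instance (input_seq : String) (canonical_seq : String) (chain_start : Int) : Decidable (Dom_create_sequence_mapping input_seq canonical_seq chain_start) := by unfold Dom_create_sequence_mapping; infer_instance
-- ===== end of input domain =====

-- B replaces A's scan of every offset × every input position by a per-character
-- position index and offset voting (only matching pairs are counted); same return value.

-- ===== PORT A =====
-- inner loop: matches counted when input_seq is positioned at start_pos
def pvA_matchesAt (il cl : List Char) (start_pos : Int) : Int :=
  (PySem.List.pyRange 0 (il.length : Int) 1).foldl
    (fun acc i =>
      if 0 ≤ start_pos + i ∧ start_pos + i < (cl.length : Int) then
        -- both indices are guarded in range, so option equality is Python's char ==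
        if PySem.List.pyGet? cl (start_pos + i) = PySem.List.pyGet? il i then acc + 1 else acc
      else acc) 0

-- outer sliding-window loop, state (best_start_pos, best_matches)
def pvA_best (il cl : List Char) : Int × Int :=
  (PySem.List.pyRange (max 0 (-(il.length : Int) + 1))
      (min (cl.length : Int) ((cl.length : Int) + (il.length : Int))) 1).foldl
    (fun st start_pos =>
      let ms := pvA_matchesAt il cl start_pos
      if ms > st.2 then (start_pos, ms) else st)
    (0, 0)

def create_sequence_mapping (input_seq : String) (canonical_seq : String) (chain_start : Int) : List (Int × Int) :=
  let il := input_seq.toList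
  let cl := canonical_seq.toList
  if cl = [] then
    ((PySem.List.pyRange 0 (il.length : Int) 1).foldl
      (fun mp i => mp.insert (i + 1) (chain_start + i)) PySem.Dict.empty).items
  else
    let best := (pvA_best il cl).1
    ((PySem.List.pyRange 0 (il.length : Int) 1).foldl
      (fun mp i =>
        if 1 ≤ best + i + 1 ∧ best + i + 1 ≤ (cl.length : Int) then
          mp.insert (best + i + 1) (chain_start + i)
        else mp)
      PySem.Dict.empty).items

-- ===== PORT B =====
-- positions: for j, ch in enumerate(canonical_seq): positions.setdefault(ch, []).append(j)
def pvB_positions (cl : List Char) : PySem.Dict Char (List Int) :=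
  (PySem.List.enumerate cl).foldl
    (fun d p => d.modify p.2 [] (fun l => l ++ [p.1])) PySem.Dict.empty

-- votes: for i, ch in enumerate(input_seq): for d in [j-i for j in positions.get(ch,[]) if j>=i]: votes[d] = votes.get(d,0)+1
def pvB_votes (il cl : List Char) : PySem.Dict Int Int :=
  (PySem.List.enumerate il).foldl
    (fun v p =>
      ((((pvB_positions cl).getD p.2 []).filter (fun j => decide (p.1 ≤ j))).map
          (fun j => j - p.1)).foldl
        (fun v d => v.insert d (v.getD d 0 + 1)) v)
    PySem.Dict.empty

-- best: scan d in range(m), keep first strictly greater vote count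
def pvB_best (il cl : List Char) : Int × Int :=
  (PySem.List.pyRange 0 (cl.length : Int) 1).foldl
    (fun st d =>
      let c := (pvB_votes il cl).getD d 0
      if c > st.2 then (d, c) else st)
    (0, 0)

def create_sequence_mapping_alt (input_seq : String) (canonical_seq : String) (chain_start : Int) : List (Int × Int) :=
  let il := input_seq.toList
  let cl := canonical_seq.toList
  if cl = [] then
    ((PySem.List.pyRange 0 (il.length : Int) 1).foldl
      (fun mp i => mp.insert (i + 1) (chain_start + i)) PySem.Dict.empty).items
  else
    let best := (pvB_best il cl).1
    ((PySem.List.pyRange 0 (il.length : Int) 1).foldl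
      (fun mp i =>
        if best + i + 1 ≤ (cl.length : Int) then
          mp.insert (best + i + 1) (chain_start + i)
        else mp)
      PySem.Dict.empty).items

-- ===== PRECONDITION & SPEC =====
def Spec_create_sequence_mapping (input_seq : String) (canonical_seq : String) (chain_start : Int) (out : List (Int × Int)) : Prop := out = create_sequence_mapping_alt input_seq canonical_seq chain_start
instance (input_seq : String) (canonical_seq : String) (chain_start : Int) (out : List (Int × Int)) : Decidable (Spec_create_sequence_mapping input_seq canonical_seq chain_start out) := by unfold Spec_create_sequence_mapping; infer_instance

-- ===== CLAIM (what is proved, stated in full; the proofs are below) =====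
def Claim_equal_create_sequence_mapping : Prop := ∀ (input_seq : String) (canonical_seq : String) (chain_start : Int), Dom_create_sequence_mapping input_seq canonical_seq chain_start → Spec_create_sequence_mapping input_seq canonical_seq chain_start (create_sequence_mapping input_seq canonical_seq chain_start)

-- ===== LEMMAS AND PROOFS =====

-- positions.get(c, []) is the index list of c's occurrences in canonical_seq
lemma pvB_positions_getD (cl : List Char) (c : Char) :
    (pvB_positions cl).getD c []
      = ((PySem.List.enumerate cl).filter (fun p => p.2 == c)).map (fun p => p.1) := by
  have h : (PySem.List.enumerate cl 0).foldl
      (fun (d : PySem.Dict Char (List Int)) p => d.modify p.2 [] (fun l => l ++ [p.1])) PySem.Dict.empty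
      = ((PySem.List.enumerate cl 0).map Prod.swap).foldl
      (fun d p => d.modify p.1 [] (fun l => l ++ [p.2])) PySem.Dict.empty := by
    rw [List.foldl_map]; rfl
  rw [pvB_positions, h, PySem.Dict.getD_foldl_modify_append]
  simp [List.filter_map, List.map_map, Function.comp_def, Prod.swap]

-- how often x occurs among the recorded positions of c (enumeration starting at k)
lemma pv_count_positions_aux (c : Char) : ∀ (cl : List Char) (k x : Int),
    List.count x (((PySem.List.enumerate cl k).filter (fun p => p.2 == c)).map (fun p => p.1))
      = if k ≤ x ∧ x < k + cl.length ∧ PySem.List.pyGet? cl (x - k) = some c then 1 else 0 := by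
  intro cl
  induction cl with
  | nil =>
    intro k x
    simp only [PySem.List.enumerate, List.filter_nil, List.map_nil, List.count_nil,
      List.length_nil]
    rw [if_neg]; rintro ⟨h1, h2, h3⟩; simp at h2; omega
  | cons ch t ih =>
    intro k x
    have he : PySem.List.enumerate (ch :: t) k = (k, ch) :: PySem.List.enumerate t (k + 1) := by
      simp [PySem.List.enumerate]
    rw [he, List.filter_cons]
    rcases lt_trichotomy x k with h | rfl | h
    · -- x < k
      have htail := ih (k + 1) x
      rw [if_neg (by rintro ⟨h1, _, _⟩; omega)] at htail
      rw [if_neg (show ¬ (k ≤ x ∧ x < k + ((ch :: t).length : Int) ∧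
            PySem.List.pyGet? (ch :: t) (x - k) = some c) from by rintro ⟨h1, _, _⟩; omega)]
      by_cases hch : (ch == c) = true
      · rw [if_pos hch]
        simp [htail, show ¬ (k = x) from by omega]
      · rw [if_neg hch, htail]
    · -- x = k (rcases rfl substituted k := x)
      have htail := ih (x + 1) x
      rw [if_neg (by rintro ⟨h1, _, _⟩; omega)] at htail
      by_cases hch : (ch == c) = true
      · have hcc : ch = c := by simpa using hch
        subst hcc
        rw [if_pos hch]
        rw [if_pos (show x ≤ x ∧ x < x + ((ch :: t).length : Int) ∧
              PySem.List.pyGet? (ch :: t) (x - x) = some ch from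
            ⟨le_refl _, by simp,
             by rw [show x - x = (0 : Int) from by omega, PySem.List.pyGet?_zero_cons]⟩)]
        simp [htail]
      · rw [if_neg hch, htail]
        rw [if_neg]
        rintro ⟨_, _, h3⟩
        rw [show x - x = (0 : Int) from by omega, PySem.List.pyGet?_zero_cons] at h3
        exact absurd (Option.some.inj h3) (by simpa using hch)
    · -- k < x
      have hget : PySem.List.pyGet? (ch :: t) (x - k) = PySem.List.pyGet? t (x - (k + 1)) := by
        rw [show x - k = ((x - (k + 1)).toNat : Int) + 1 from by omega,
          PySem.List.pyGet?_cons_succ]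
        congr 1; omega
      have hL : List.count x ((if (ch == c) = true
            then (k, ch) :: (PySem.List.enumerate t (k + 1)).filter (fun p => p.2 == c)
            else (PySem.List.enumerate t (k + 1)).filter (fun p => p.2 == c)).map (fun p => p.1))
          = List.count x (((PySem.List.enumerate t (k + 1)).filter (fun p => p.2 == c)).map (fun p => p.1)) := by
        by_cases hch : (ch == c) = true
        · rw [if_pos hch]
          simp only [List.map_cons, List.count_cons, beq_iff_eq,
            if_neg (show ¬ (k = x) from by omega)]
          omega
        · rw [if_neg hch]
      rw [hL, ih, hget]
      apply if_congr _ rfl rfl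
      constructor
      · rintro ⟨h1, h2, h3⟩; exact ⟨by omega, by simp; omega, h3⟩
      · rintro ⟨h1, h2, h3⟩; refine ⟨by omega, ?_, h3⟩; simp at h2; omega

-- the vote-accumulation loop sums per-pair vote counts
lemma pv_votes_fold (off : Int × Char → List Int) (x : Int) :
    ∀ (l : List (Int × Char)) (v : PySem.Dict Int Int),
    (l.foldl (fun v p => (off p).foldl (fun v d => v.insert d (v.getD d 0 + 1)) v) v).getD x 0
      = v.getD x 0 + (l.map (fun p => (List.count x (off p) : Int))).sum := by
  intro l
  induction l with
  | nil => intro v; simp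
  | cons p t ih =>
    intro v
    simp only [List.foldl_cons, List.map_cons, List.sum_cons]
    rw [ih, PySem.Dict.getD_foldl_insert_add_one]
    ring

lemma pv_sum_votes (cl : List Char) (d : Int) : ∀ (il : List Char) (k : Int),
    ((PySem.List.enumerate il k).map
      (fun p : Int × Char => if 0 ≤ d + p.1 ∧ d + p.1 < (cl.length : Int) ∧
          PySem.List.pyGet? cl (d + p.1) = some p.2 then (1 : Int) else 0)).sum
      = ((PySem.List.pyRange k (k + il.length) 1).map
      (fun i => if 0 ≤ d + i ∧ d + i < (cl.length : Int) ∧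
          PySem.List.pyGet? cl (d + i) = PySem.List.pyGet? il (i - k) then (1 : Int) else 0)).sum := by
  intro il
  induction il with
  | nil =>
    intro k
    simp [PySem.List.enumerate]
  | cons x t ih =>
    intro k
    have he : PySem.List.enumerate (x :: t) k = (k, x) :: PySem.List.enumerate t (k + 1) := by
      simp [PySem.List.enumerate]
    have hr : PySem.List.pyRange k (k + ((x :: t).length : Int)) 1
        = k :: PySem.List.pyRange (k + 1) (k + ((x :: t).length : Int)) 1 :=
      PySem.List.pyRange_one_cons (by simp only [List.length_cons]; push_cast; omega)
    rw [he, hr, List.map_cons, List.map_cons, List.sum_cons, List.sum_cons]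
    congr 1
    · rw [show k - k = (0 : Int) from by omega, PySem.List.pyGet?_zero_cons]
    · rw [ih (k + 1)]
      have hend : k + (((x :: t).length : Nat) : Int) = (k + 1) + (t.length : Int) := by
        simp only [List.length_cons]; push_cast; omega
      rw [hend]
      apply congrArg List.sum
      apply List.map_congr_left
      intro i hi
      have hik : k + 1 ≤ i := (PySem.List.mem_pyRange_one.mp hi).1
      have hget : PySem.List.pyGet? (x :: t) (i - k) = PySem.List.pyGet? t (i - (k + 1)) := by
        rw [show i - k = ((i - (k + 1)).toNat : Int) + 1 from by omega,
          PySem.List.pyGet?_cons_succ]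
        congr 1; omega
      rw [hget]

lemma pv_votes_eq_matches (il cl : List Char) (d : Int) (hd : 0 ≤ d) :
    (pvB_votes il cl).getD d 0 = pvA_matchesAt il cl d := by
  rw [pvB_votes, pv_votes_fold, PySem.Dict.getD_empty, zero_add]
  have hoff : ∀ p : Int × Char,
      (List.count d ((((pvB_positions cl).getD p.2 []).filter (fun j => decide (p.1 ≤ j))).map
          (fun j => j - p.1)) : Int)
        = if 0 ≤ d + p.1 ∧ d + p.1 < (cl.length : Int) ∧
              PySem.List.pyGet? cl (d + p.1) = some p.2 then 1 else 0 := by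
    intro p
    have hinj : Function.Injective (fun j : Int => j - p.1) := by
      intro a b hab; simpa using hab
    have h1 := List.count_map_of_injective
      (((pvB_positions cl).getD p.2 []).filter (fun j => decide (p.1 ≤ j)))
      (fun j : Int => j - p.1) hinj (d + p.1)
    simp only [add_sub_cancel_right] at h1
    rw [h1]
    rw [List.count_filter (by simp; omega)]
    rw [pvB_positions_getD, pv_count_positions_aux]
    simp only [zero_add, sub_zero]
    split <;> simp
  rw [List.map_congr_left (fun p _ => hoff p)]
  rw [pv_sum_votes cl d il 0]
  rw [pvA_matchesAt]
  rw [PySem.List.foldl_congr_mem _ _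
    (fun acc i => if (0 ≤ d + i ∧ d + i < (cl.length : Int) ∧
        PySem.List.pyGet? cl (d + i) = PySem.List.pyGet? il i) then acc + 1 else acc) 0
    (by intro acc x _; beta_reduce; split_ifs <;> tauto)]
  rw [PySem.List.foldl_ite_add_one, ← PySem.List.sum_map_ite_one_zero]
  simp only [zero_add]
  apply congrArg List.sum
  apply List.map_congr_left
  intro i _
  simp [sub_zero]

lemma pv_scan_nonneg (f : Int → Int) : ∀ (l : List Int) (st : Int × Int),
    (∀ x ∈ l, 0 ≤ x) → 0 ≤ st.1 →
    0 ≤ (l.foldl (fun st d => let c := f d; if c > st.2 then (d, c) else st) st).1 := by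
  intro l
  induction l with
  | nil => intro st _ h; simpa using h
  | cons x t ih =>
    intro st hl hst
    simp only [List.foldl_cons]
    by_cases hc : f x > st.2
    · simp only [hc, if_pos]
      exact ih (x, f x) (fun y hy => hl y (List.mem_cons_of_mem _ hy)) (hl x (List.mem_cons_self))
    · simp only [hc]
      exact ih st (fun y hy => hl y (List.mem_cons_of_mem _ hy)) hst

lemma pv_best_nonneg (il cl : List Char) : 0 ≤ (pvB_best il cl).1 := by
  rw [pvB_best]
  exact pv_scan_nonneg (fun d => (pvB_votes il cl).getD d 0) _ _
    (fun x hx => (PySem.List.mem_pyRange_one.mp hx).1) (by simp)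

lemma pv_best_eq (il cl : List Char) (hil : il ≠ []) :
    pvA_best il cl = pvB_best il cl := by
  have hlen : 1 ≤ il.length := List.length_pos_iff.mpr hil
  have h1 : max 0 (-(il.length : Int) + 1) = 0 := by omega
  have h2 : min (cl.length : Int) ((cl.length : Int) + (il.length : Int)) = (cl.length : Int) := by
    omega
  rw [pvA_best, pvB_best, h1, h2]
  apply PySem.List.foldl_congr_mem
  intro st x hx
  have hx0 : 0 ≤ x := (PySem.List.mem_pyRange_one.mp hx).1
  show (let ms := pvA_matchesAt il cl x; if ms > st.2 then (x, ms) else st)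
      = (let c := (pvB_votes il cl).getD x 0; if c > st.2 then (x, c) else st)
  rw [pv_votes_eq_matches il cl x hx0]

-- ===== VERDICT (by name: the statement is the Claim_ definition above) =====
theorem create_sequence_mapping_spec : Claim_equal_create_sequence_mapping := by
  intro input_seq canonical_seq chain_start _
  unfold Spec_create_sequence_mapping
  simp only [create_sequence_mapping, create_sequence_mapping_alt]
  by_cases hcl : canonical_seq.toList = []
  · simp [hcl]
  · rw [if_neg hcl, if_neg hcl]
    by_cases hil : input_seq.toList = []
    · have h0 : PySem.List.pyRange 0 (0 : Int) 1 = [] := PySem.List.pyRange_one_eq_nil le_rfl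
      simp [hil, h0]
    · rw [pv_best_eq _ _ hil]
      have hB := pv_best_nonneg input_seq.toList canonical_seq.toList
      apply congrArg PySem.Dict.items
      apply PySem.List.foldl_congr_mem
      intro mp i hi
      have hi0 : 0 ≤ i := (PySem.List.mem_pyRange_one.mp hi).1
      show (if 1 ≤ (pvB_best input_seq.toList canonical_seq.toList).1 + i + 1 ∧
              (pvB_best input_seq.toList canonical_seq.toList).1 + i + 1 ≤ (canonical_seq.toList.length : Int)
            then mp.insert ((pvB_best input_seq.toList canonical_seq.toList).1 + i + 1) (chain_start + i) else mp)
          = (if (pvB_best input_seq.toList canonical_seq.toList).1 + i + 1 ≤ (canonical_seq.toList.length : Int)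
            then mp.insert ((pvB_best input_seq.toList canonical_seq.toList).1 + i + 1) (chain_start + i) else mp)
      exact if_congr ⟨And.right, fun h => ⟨by omega, h⟩⟩ rfl rfl
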